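-- pv_equiv track=rewrite | github.com/AP-MI-2021/lab-3-ClaudiuDC21 | main.py | get_longest_prime_digits
-- ===== SOURCE A (Python) =====
-- from typing import List
--
-- def is_prime(n: int) -> bool:
--     '''
--     Determina daca un numar dat n este prim.
--     :param n: numar intreg dat.
--     :return: Treu daca n este prime, False in caz contrar.
--     '''
--     if n < 2:
--         return False
--     for d in range(2, int(n ** 0.5) + 1):
--         if n % d == 0:
--             return False
--     return True
--
-- def all_numbers_prime(lst: List[int]) -> bool:
--     '''
--     Determina daca fiecare cifra a elementelor unei liste sunt prime.
--     :param lst: O lista data.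
--     :return: True daca fiecare cifra a elemntelor listei sunt prime, False in caz contrar.
--     '''
--     for n in lst:
--         while n != 0:
--             if is_prime(n % 10) == False:
--                 return False
--             n = n // 10
--     return True
--
-- def get_longest_prime_digits(lst):
--     '''
--     Determina cea mai lunga subsecventa a carei elemente are toate cifrele prime.
--     :param lst: Lista data.
--     :return:Cea mai lunga subsecventa a carei elemente are toate cifrele prime
--     '''
--     lungime = len(lst)
--     result = []
--     for st in range(lungime):
--         for dr in range(st, lungime):
--             if all_numbers_prime(lst[st:dr + 1]) == True and len(lst[st:dr + 1]) > len(result):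
--                 result = lst[st:dr + 1]
--     return result
-- ===== SOURCE B (Python) =====
-- def has_only_prime_digits(n):
--     # 0 has no digits (A's digit loop never runs), so it counts as valid;
--     # negative numbers never consist solely of prime digits under floor div.
--     if n < 0:
--         return False
--     if n == 0:
--         return True
--     while n:
--         if n % 10 not in (2, 3, 5, 7):
--             return False
--         n //= 10
--     return True
--
-- def get_longest_prime_digits(lst):
--     best_start = 0
--     best_len = 0
--     cur_start = 0
--     cur_len = 0
--     for i, x in enumerate(lst):
--         if has_only_prime_digits(x):
--             if cur_len == 0:
--                 cur_start = i
--             cur_len += 1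
--             if cur_len > best_len:
--                 best_len = cur_len
--                 best_start = cur_start
--         else:
--             cur_len = 0
--     return lst[best_start:best_start + best_len]
-- ===== Notes on version B (the rewrite author's own statement) =====
-- stated objective: faster
-- what changed: replaced the try-every-slice nested loops (with a digit check re-run on each slice) by a single linear scan that tracks the current run of prime-digit elements and keeps the first maximal run, returning one final slice
import Mathlib
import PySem

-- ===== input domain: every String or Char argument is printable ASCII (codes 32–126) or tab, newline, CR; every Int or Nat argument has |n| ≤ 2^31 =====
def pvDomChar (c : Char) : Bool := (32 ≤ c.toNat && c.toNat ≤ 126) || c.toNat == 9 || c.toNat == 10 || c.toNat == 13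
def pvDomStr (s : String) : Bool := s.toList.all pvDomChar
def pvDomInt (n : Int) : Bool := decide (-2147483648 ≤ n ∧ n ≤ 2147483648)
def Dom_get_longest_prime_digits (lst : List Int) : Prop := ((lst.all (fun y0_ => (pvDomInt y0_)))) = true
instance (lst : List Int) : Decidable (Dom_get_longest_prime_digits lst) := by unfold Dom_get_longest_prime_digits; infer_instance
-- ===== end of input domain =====

-- B replaces A's try-every-slice nested loops by one linear scan that keeps the first maximal
-- run of prime-digit elements (objective: faster).

-- ===== PORT A =====

-- 'int(n ** 0.5)': an exact computable integer square root; exact as a port because the float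
-- square root is exact on every argument is_prime actually receives (the digits n % 10 ∈ 0..9).
def py_isqrt (n : Int) : Int :=
  (((PySem.List.pyRange 0 (n + 1) 1).filter (fun k => decide (k * k ≤ n))).length : Int) - 1

def is_prime (n : Int) : Bool :=
  if n < 2 then false
  else (PySem.List.pyRange 2 (py_isqrt n + 1) 1).all (fun d => !(PySem.Int.mod n d == 0))

-- the 'while n != 0' digit loop inside all_numbers_prime
def digits_ok (n : Int) : Bool :=
  if _h0 : n = 0 then true
  else if _hp : is_prime (PySem.Int.mod n 10) = false then false
  else digits_ok (PySem.Int.floordiv n 10)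
termination_by n.natAbs
decreasing_by
  by_cases hn : n = -1
  · exfalso; apply _hp; subst hn; decide
  · rw [PySem.Int.floordiv_eq_ediv_of_pos (by omega)]
    omega

def all_numbers_prime : List Int → Bool
  | [] => true
  | n :: rest => if digits_ok n = false then false else all_numbers_prime rest

def get_longest_prime_digits (lst : List Int) : List Int :=
  let lungime : Int := (lst.length : Int)
  (PySem.List.pyRange 0 lungime 1).foldl (fun result st =>
    (PySem.List.pyRange st lungime 1).foldl (fun result dr =>
      if all_numbers_prime (PySem.List.slice lst (some st) (some (dr + 1))) = true
          ∧ (PySem.List.slice lst (some st) (some (dr + 1))).length > result.length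
      then PySem.List.slice lst (some st) (some (dr + 1))
      else result) result) []

-- ===== PORT B =====

-- the 'while n:' loop of has_only_prime_digits; it is only entered with n > 0 (the n ≤ 0 guard
-- coincides with 'while n' on those calls and makes termination evident)
def has_only_prime_digits_loop (n : Int) : Bool :=
  if _h : n ≤ 0 then true
  else if !(PySem.Int.mod n 10 == 2 || PySem.Int.mod n 10 == 3
            || PySem.Int.mod n 10 == 5 || PySem.Int.mod n 10 == 7) then false
  else has_only_prime_digits_loop (PySem.Int.floordiv n 10)
termination_by n.toNat
decreasing_by
  rw [PySem.Int.floordiv_eq_ediv_of_pos (by omega)]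
  omega

def has_only_prime_digits (n : Int) : Bool :=
  if n < 0 then false
  else if n = 0 then true
  else has_only_prime_digits_loop n

-- the 'for i, x in enumerate(lst)' scan, carrying (best_start, best_len, cur_start, cur_len)
def finishB : List Int → Nat → Nat → Nat → Nat → Nat → Nat × Nat
  | [], _, bs, bl, _, _ => (bs, bl)
  | x :: xs, i, bs, bl, cs, cl =>
    if has_only_prime_digits x then
      let cs' := if cl = 0 then i else cs
      let cl' := cl + 1
      if cl' > bl then finishB xs (i + 1) cs' cl' cs' cl'
      else finishB xs (i + 1) bs bl cs' cl'
    else finishB xs (i + 1) bs bl cs 0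

def get_longest_prime_digits_alt (lst : List Int) : List Int :=
  let p := finishB lst 0 0 0 0 0
  PySem.List.slice lst (some (p.1 : Int)) (some ((p.1 : Int) + (p.2 : Int)))

-- ===== PRECONDITION & SPEC =====
def Spec_get_longest_prime_digits (lst : List Int) (out : List Int) : Prop := out = get_longest_prime_digits_alt lst
instance (lst : List Int) (out : List Int) : Decidable (Spec_get_longest_prime_digits lst out) := by unfold Spec_get_longest_prime_digits; infer_instance

-- ===== CLAIM (what is proved, stated in full; the proofs are below) =====
def Claim_equal_get_longest_prime_digits : Prop := ∀ (lst : List Int), Dom_get_longest_prime_digits lst → Spec_get_longest_prime_digits lst (get_longest_prime_digits lst)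

-- ===== LEMMAS AND PROOFS =====

-- reference function: length of the valid (all-prime-digit) prefix run
def runLen : List Int → Nat
  | [] => 0
  | x :: xs => if has_only_prime_digits x then runLen xs + 1 else 0

-- reference function: the first longest run of valid elements
def best : List Int → List Int
  | [] => []
  | x :: xs => if (best xs).length ≤ runLen (x :: xs)
               then (x :: xs).take (runLen (x :: xs)) else best xs

-- ---- digit-validity: digits_ok = has_only_prime_digits ----

lemma is_prime_digit (d : Int) (h1 : 0 ≤ d) (h2 : d < 10) :
    is_prime d = (d == 2 || d == 3 || d == 5 || d == 7) := by
  interval_cases d <;> decide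

lemma mod10_bounds (n : Int) : 0 ≤ PySem.Int.mod n 10 ∧ PySem.Int.mod n 10 < 10 := by
  rw [PySem.Int.mod_eq_emod_of_pos (by omega)]
  omega

lemma digits_ok_neg : ∀ (k : Nat) (n : Int), n.natAbs ≤ k → n < 0 → digits_ok n = false := by
  intro k
  induction k with
  | zero => intro n h hn; omega
  | succ k ih =>
    intro n h hn
    rw [digits_ok, dif_neg (by omega : ¬ n = 0)]
    split
    · rfl
    · rename_i hp
      have hne1 : n ≠ -1 := by
        intro h1; apply hp; subst h1; decide
      apply ih
      · rw [PySem.Int.floordiv_eq_ediv_of_pos (by omega)]; omega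
      · rw [PySem.Int.floordiv_eq_ediv_of_pos (by omega)]; omega

lemma digits_ok_pos : ∀ (k : Nat) (n : Int), n.natAbs ≤ k → 0 < n →
    digits_ok n = has_only_prime_digits_loop n := by
  intro k
  induction k with
  | zero => intro n h hn; omega
  | succ k ih =>
    intro n h hn
    rw [digits_ok, dif_neg (by omega : ¬ n = 0),
        has_only_prime_digits_loop, dif_neg (by omega : ¬ n ≤ 0)]
    obtain ⟨hd0, hd10⟩ := mod10_bounds n
    rw [is_prime_digit _ hd0 hd10]
    have hfd : PySem.Int.floordiv n 10 = n / 10 := PySem.Int.floordiv_eq_ediv_of_pos (by omega)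
    cases hb : (PySem.Int.mod n 10 == 2 || PySem.Int.mod n 10 == 3
                || PySem.Int.mod n 10 == 5 || PySem.Int.mod n 10 == 7) with
    | false => simp
    | true =>
      simp only [Bool.not_true, Bool.false_eq_true, if_false,
                 dif_neg (by simp : ¬ (true = false))]
      rw [hfd]
      have h10 : 0 ≤ n / 10 := by omega
      rcases eq_or_lt_of_le h10 with hz | hpos
      · rw [← hz, digits_ok, dif_pos rfl, has_only_prime_digits_loop, dif_pos le_rfl]
      · exact ih (n / 10) (by omega) hpos

lemma digits_ok_eq (n : Int) : digits_ok n = has_only_prime_digits n := by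
  rcases lt_trichotomy n 0 with hn | hn | hn
  · rw [has_only_prime_digits, if_pos hn]
    exact digits_ok_neg n.natAbs n le_rfl hn
  · subst hn
    rw [has_only_prime_digits, if_neg (by omega), if_pos rfl, digits_ok, dif_pos rfl]
  · rw [has_only_prime_digits, if_neg (by omega), if_neg (by omega)]
    exact digits_ok_pos n.natAbs n le_rfl hn

lemma all_numbers_prime_eq (l : List Int) :
    all_numbers_prime l = l.all has_only_prime_digits := by
  induction l with
  | nil => rfl
  | cons x xs ih =>
    rw [all_numbers_prime, List.all_cons, digits_ok_eq, ih]
    cases has_only_prime_digits x <;> simp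

-- ---- facts about runLen and best ----

lemma runLen_le (l : List Int) : runLen l ≤ l.length := by
  induction l with
  | nil => simp [runLen]
  | cons x xs ih =>
    rw [runLen]; split
    · simp; omega
    · simp

lemma all_take_iff (l : List Int) : ∀ (k : Nat), k ≤ l.length →
    ((l.take k).all has_only_prime_digits = true ↔ k ≤ runLen l) := by
  induction l with
  | nil => intro k hk; simp at hk; simp [hk]
  | cons x xs ih =>
    intro k hk
    cases k with
    | zero => simp
    | succ k =>
      rw [List.take_succ_cons, List.all_cons, runLen]
      cases hv : has_only_prime_digits x with
      | false => simp
      | true =>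
        simp only [Bool.true_and, if_true]
        rw [ih k (by simpa using hk)]
        omega

lemma best_le_length (l : List Int) : (best l).length ≤ l.length := by
  induction l with
  | nil => simp [best]
  | cons x xs ih =>
    rw [best]; split
    · simp
    · simp; omega

lemma runLen_le_best (l : List Int) : runLen l ≤ (best l).length := by
  cases l with
  | nil => simp [runLen, best]
  | cons x xs =>
    rw [best]; split
    · rename_i h
      simp
      exact runLen_le _
    · omega

lemma best_eq_take_of_le (l : List Int) (h : (best l).length ≤ runLen l) :
    best l = l.take (runLen l) := by
  cases l with
  | nil => simp [best, runLen]
  | cons x xs =>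
    rw [best]
    rw [best] at h
    split
    · rfl
    · rename_i hc
      split at h
      · exact absurd h (by omega)
      · exact absurd h (by omega)

lemma runLen_all (l : List Int) (h : ∀ x ∈ l, has_only_prime_digits x = true) :
    runLen l = l.length := by
  induction l with
  | nil => rfl
  | cons x xs ih =>
    rw [runLen, if_pos (h x (by simp))]
    simp [ih (fun y hy => h y (by simp [hy]))]

lemma best_all_valid (l : List Int) (h : ∀ x ∈ l, has_only_prime_digits x = true) :
    best l = l := by
  have h1 := best_eq_take_of_le l (by rw [runLen_all l h]; exact best_le_length l)
  rw [h1, runLen_all l h, List.take_length]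

lemma runLen_append_all (u r : List Int) (h : ∀ x ∈ u, has_only_prime_digits x = true) :
    runLen (u ++ r) = u.length + runLen r := by
  induction u with
  | nil => simp
  | cons v u' ih =>
    rw [List.cons_append, runLen, if_pos (h v (by simp))]
    rw [ih (fun y hy => h y (by simp [hy]))]
    simp; omega

lemma best_cons_invalid (x : Int) (r : List Int) (hx : has_only_prime_digits x = false) :
    best (x :: r) = best r := by
  rw [best]
  have h0 : runLen (x :: r) = 0 := by rw [runLen, if_neg (by simp [hx])]
  rw [h0]
  split
  · rename_i h
    have : best r = [] := List.eq_nil_of_length_eq_zero (by omega)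
    simp [this]
  · rfl

lemma best_run_break (u : List Int) (x : Int) (r : List Int)
    (hu : ∀ y ∈ u, has_only_prime_digits y = true) (hx : has_only_prime_digits x = false) :
    best (u ++ x :: r) = if (best r).length ≤ u.length then u else best r := by
  induction u with
  | nil =>
    rw [List.nil_append, best_cons_invalid x r hx]
    split
    · rename_i h
      simp only [List.length_nil, Nat.le_zero] at h
      exact List.eq_nil_of_length_eq_zero h
    · rfl
  | cons v u' ih =>
    have hrl : runLen (v :: u' ++ x :: r) = u'.length + 1 := by
      rw [show v :: u' ++ x :: r = (v :: u') ++ (x :: r) from rfl,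
          runLen_append_all (v :: u') (x :: r) (fun y hy => hu y hy),
          runLen, if_neg (by simp [hx])]
      simp
    have htake : (v :: u' ++ x :: r).take (u'.length + 1) = v :: u' := by
      rw [show v :: u' ++ x :: r = (v :: u') ++ (x :: r) from rfl,
          show u'.length + 1 = (v :: u').length from rfl, List.take_left]
    rw [List.cons_append, best, ← List.cons_append, hrl, htake,
        ih (fun y hy => hu y (by simp [hy]))]
    by_cases hc : (best r).length ≤ u'.length
    · have h1 : (best r).length ≤ (v :: u').length := by
        simp only [List.length_cons]; omega
      rw [if_pos hc, if_pos (by simp), if_pos h1]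
    · rw [if_neg hc]
      by_cases hc2 : (best r).length ≤ u'.length + 1
      · rw [if_pos hc2, if_pos (by simpa using hc2)]
      · rw [if_neg hc2, if_neg (by simpa using hc2)]

-- ---- the A side: the nested loops compute `best` ----

lemma innerLoop (lst : List Int) (st : Int) (hst : 0 ≤ st) :
    ∀ (m : Nat) (d : Int) (r : List Int), st ≤ d → d = (lst.length : Int) - m →
    (PySem.List.pyRange d (lst.length : Int) 1).foldl (fun result dr =>
      if all_numbers_prime (PySem.List.slice lst (some st) (some (dr + 1))) = true
          ∧ (PySem.List.slice lst (some st) (some (dr + 1))).length > result.length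
      then PySem.List.slice lst (some st) (some (dr + 1))
      else result) r
    = (if runLen (lst.drop st.toNat) > (d - st).toNat
          ∧ runLen (lst.drop st.toNat) > r.length
       then (lst.drop st.toNat).take (runLen (lst.drop st.toNat)) else r) := by
  intro m
  induction m with
  | zero =>
    intro d r hsd hd
    rw [PySem.List.pyRange_one_eq_nil (by omega)]
    simp only [List.foldl_nil]
    have hL := runLen_le (lst.drop st.toNat)
    rw [List.length_drop] at hL
    rw [if_neg]
    rintro ⟨h1, h2⟩
    omega
  | succ m ih =>
    intro d r hsd hd
    have hdlen : d < (lst.length : Int) := by omega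
    rw [PySem.List.pyRange_one_cons hdlen, List.foldl_cons]
    have hslice : PySem.List.slice lst (some st) (some (d + 1))
        = (lst.drop st.toNat).take ((d - st).toNat + 1) := by
      rw [PySem.List.slice_toNat lst hst (by omega)]
      congr 1
      omega
    rw [hslice, ih (d + 1) _ (by omega) (by omega)]
    have hd1 : (d + 1 - st).toNat = (d - st).toNat + 1 := by omega
    rw [hd1]
    have htlen : (lst.drop st.toNat).length = lst.length - st.toNat := List.length_drop
    have hLle : runLen (lst.drop st.toNat) ≤ (lst.drop st.toNat).length :=
      runLen_le (lst.drop st.toNat)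
    have hkle : (d - st).toNat + 1 ≤ (lst.drop st.toNat).length := by omega
    have hlen : ((lst.drop st.toNat).take ((d - st).toNat + 1)).length = (d - st).toNat + 1 := by
      rw [List.length_take]; omega
    have hall : (all_numbers_prime ((lst.drop st.toNat).take ((d - st).toNat + 1)) = true)
        ↔ (d - st).toNat + 1 ≤ runLen (lst.drop st.toNat) := by
      rw [all_numbers_prime_eq]
      exact all_take_iff (lst.drop st.toNat) ((d - st).toNat + 1) hkle
    by_cases hC : (all_numbers_prime ((lst.drop st.toNat).take ((d - st).toNat + 1)) = true
        ∧ ((lst.drop st.toNat).take ((d - st).toNat + 1)).length > r.length)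
    · obtain ⟨hCa, hCb⟩ := hC
      have hkL : (d - st).toNat + 1 ≤ runLen (lst.drop st.toNat) := hall.mp hCa
      have hkr : (d - st).toNat + 1 > r.length := by rw [hlen] at hCb; exact hCb
      have hstep : (if (all_numbers_prime ((lst.drop st.toNat).take ((d - st).toNat + 1)) = true
          ∧ ((lst.drop st.toNat).take ((d - st).toNat + 1)).length > r.length)
          then (lst.drop st.toNat).take ((d - st).toNat + 1) else r)
          = (lst.drop st.toNat).take ((d - st).toNat + 1) := if_pos ⟨hCa, hCb⟩
      rw [hstep, hlen,
          if_pos (show runLen (lst.drop st.toNat) > (d - st).toNat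
              ∧ runLen (lst.drop st.toNat) > r.length from ⟨by omega, by omega⟩)]
      by_cases hLk : runLen (lst.drop st.toNat) > (d - st).toNat + 1
      · rw [if_pos ⟨hLk, hLk⟩]
      · rw [if_neg (by omega : ¬(runLen (lst.drop st.toNat) > (d - st).toNat + 1
            ∧ runLen (lst.drop st.toNat) > (d - st).toNat + 1))]
        have heq : runLen (lst.drop st.toNat) = (d - st).toNat + 1 := by omega
        rw [heq]
    · have hstep : (if (all_numbers_prime ((lst.drop st.toNat).take ((d - st).toNat + 1)) = true
          ∧ ((lst.drop st.toNat).take ((d - st).toNat + 1)).length > r.length)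
          then (lst.drop st.toNat).take ((d - st).toNat + 1) else r) = r := if_neg hC
      rw [hstep]
      have hC2 : ¬((d - st).toNat + 1 ≤ runLen (lst.drop st.toNat)) ∨ (d - st).toNat + 1 ≤ r.length := by
        rcases Decidable.not_and_iff_or_not.mp hC with h | h
        · left; intro hkL; exact h (hall.mpr hkL)
        · right; rw [hlen] at h; omega
      split_ifs with h1 h2 h3 <;> try rfl
      · exfalso; rcases hC2 with h | h <;> omega
      · exfalso; rcases hC2 with h | h <;> omega

lemma outerLoop (lst : List Int) :
    ∀ (m : Nat) (s : Int) (r : List Int), 0 ≤ s → s = (lst.length : Int) - m →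
    (PySem.List.pyRange s (lst.length : Int) 1).foldl (fun result st =>
      (PySem.List.pyRange st (lst.length : Int) 1).foldl (fun result dr =>
        if all_numbers_prime (PySem.List.slice lst (some st) (some (dr + 1))) = true
            ∧ (PySem.List.slice lst (some st) (some (dr + 1))).length > result.length
        then PySem.List.slice lst (some st) (some (dr + 1))
        else result) result) r
    = (if (best (lst.drop s.toNat)).length > r.length then best (lst.drop s.toNat) else r) := by
  intro m
  induction m with
  | zero =>
    intro s r hs0 hs
    rw [PySem.List.pyRange_one_eq_nil (by omega)]
    simp only [List.foldl_nil]
    have hdrop : lst.drop s.toNat = [] := List.drop_eq_nil_of_le (by omega)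
    rw [hdrop]
    simp [best]
  | succ m ih =>
    intro s r hs0 hs
    have hslen : s < (lst.length : Int) := by omega
    rw [PySem.List.pyRange_one_cons hslen, List.foldl_cons,
        innerLoop lst s hs0 (m + 1) s r le_rfl hs,
        ih (s + 1) _ (by omega) (by omega)]
    have h00 : (s - s).toNat = 0 := by omega
    rw [h00]
    have hlt : s.toNat < lst.length := by omega
    have hdrop : lst.drop s.toNat = lst[s.toNat] :: lst.drop (s.toNat + 1) :=
      List.drop_eq_getElem_cons hlt
    have hs1 : (s + 1).toNat = s.toNat + 1 := by omega
    rw [hs1]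
    have hbest : best (lst.drop s.toNat)
        = if (best (lst.drop (s.toNat + 1))).length ≤ runLen (lst.drop s.toNat)
          then (lst.drop s.toNat).take (runLen (lst.drop s.toNat))
          else best (lst.drop (s.toNat + 1)) := by
      conv_lhs => rw [hdrop, best]
      rw [← hdrop]
    have hLlen : ((lst.drop s.toNat).take (runLen (lst.drop s.toNat))).length
        = runLen (lst.drop s.toNat) := by
      rw [List.length_take]
      have := runLen_le (lst.drop s.toNat)
      omega
    by_cases hLr : runLen (lst.drop s.toNat) > r.length
    · have hstep : (if runLen (lst.drop s.toNat) > 0 ∧ runLen (lst.drop s.toNat) > r.length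
          then (lst.drop s.toNat).take (runLen (lst.drop s.toNat)) else r)
          = (lst.drop s.toNat).take (runLen (lst.drop s.toNat)) := if_pos ⟨by omega, hLr⟩
      rw [hbest, hstep]
      by_cases hLB : (best (lst.drop (s.toNat + 1))).length ≤ runLen (lst.drop s.toNat)
      · rw [if_pos hLB, hLlen, if_neg (by omega), if_pos hLr]
      · rw [if_neg hLB, hLlen, if_pos (by omega), if_pos (by omega)]
    · have hstep : (if runLen (lst.drop s.toNat) > 0 ∧ runLen (lst.drop s.toNat) > r.length
          then (lst.drop s.toNat).take (runLen (lst.drop s.toNat)) else r) = r := by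
        apply if_neg
        rintro ⟨h1, h2⟩
        omega
      rw [hbest, hstep]
      by_cases hLB : (best (lst.drop (s.toNat + 1))).length ≤ runLen (lst.drop s.toNat)
      · rw [if_pos hLB, hLlen, if_neg (by omega), if_neg (by omega)]
      · rw [if_neg hLB]

lemma A_eq_best (lst : List Int) : get_longest_prime_digits lst = best lst := by
  simp only [get_longest_prime_digits]
  rw [outerLoop lst lst.length 0 [] le_rfl (by omega)]
  norm_num

-- ---- the B side: the linear scan computes `best` ----

lemma finishB_spec (lst : List Int) :
    ∀ (xs : List Int) (i bs bl cs cl : Nat),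
    xs = lst.drop i → i ≤ lst.length → cl ≤ bl → cl ≤ i →
    (0 < cl → cs = i - cl) →
    (∀ x ∈ (lst.drop (i - cl)).take cl, has_only_prime_digits x = true) →
    ((lst.drop (finishB xs i bs bl cs cl).1).take (finishB xs i bs bl cs cl).2)
    = if bl < (best (lst.drop (i - cl))).length then best (lst.drop (i - cl))
      else (lst.drop bs).take bl := by
  intro xs
  induction xs with
  | nil =>
    intro i bs bl cs cl hxs hi hclbl hcli hcs hall
    have hlen0 : lst.length - i = 0 := by
      have h := congrArg List.length hxs
      simp [List.length_drop] at h
      omega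
    simp only [finishB]
    have htk : (lst.drop (i - cl)).take cl = lst.drop (i - cl) :=
      List.take_of_length_le (by rw [List.length_drop]; omega)
    have hv : ∀ y ∈ lst.drop (i - cl), has_only_prime_digits y = true := by
      intro y hy
      exact hall y (by rw [htk]; exact hy)
    rw [best_all_valid _ hv,
        if_neg (by rw [List.length_drop]; omega : ¬ bl < (lst.drop (i - cl)).length)]
  | cons x xs' ih =>
    intro i bs bl cs cl hxs hi hclbl hcli hcs hall
    have hdropi : lst.drop i = x :: xs' := hxs.symm
    have hilen : i < lst.length := by
      by_contra h
      rw [List.drop_eq_nil_of_le (by omega)] at hdropi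
      simp at hdropi
    have hxs' : xs' = lst.drop (i + 1) := by
      have h1 : lst.drop (i + 1) = (lst.drop i).drop 1 := by
        rw [List.drop_drop]
      rw [h1, hdropi, List.drop_one, List.tail_cons]
    have hulen : ((lst.drop (i - cl)).take cl).length = cl := by
      rw [List.length_take, List.length_drop]; omega
    have hT : lst.drop (i - cl) = (lst.drop (i - cl)).take cl ++ (x :: xs') := by
      conv_lhs => rw [← List.take_append_drop cl (lst.drop (i - cl))]
      congr 1
      rw [List.drop_drop, show i - cl + cl = i from by omega, hdropi]
    obtain ⟨u, huT, hul, hua⟩ : ∃ u : List Int, lst.drop (i - cl) = u ++ (x :: xs')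
        ∧ u.length = cl ∧ ∀ y ∈ u, has_only_prime_digits y = true :=
      ⟨(lst.drop (i - cl)).take cl, hT, hulen, hall⟩
    simp only [finishB]
    by_cases hv : has_only_prime_digits x = true
    · rw [if_pos hv]
      have hcs' : (if cl = 0 then i else cs) = i - cl := by
        split
        · omega
        · rename_i h; rw [hcs (by omega)]
      rw [hcs']
      have hT1 : (i + 1) - (cl + 1) = i - cl := by omega
      have hallnew : ∀ y ∈ (lst.drop ((i + 1) - (cl + 1))).take (cl + 1),
          has_only_prime_digits y = true := by
        rw [hT1]
        have htk1 : (lst.drop (i - cl)).take (cl + 1) = u ++ [x] := by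
          rw [huT, ← hul]
          simp [List.take_append]
        rw [htk1]
        intro y hy
        rcases List.mem_append.mp hy with h | h
        · exact hua y h
        · simp at h; subst h; exact hv
      have hrun : cl + 1 ≤ runLen (lst.drop (i - cl)) := by
        rw [huT, runLen_append_all u _ hua, runLen, if_pos hv]
        omega
      by_cases hgt : cl + 1 > bl
      · rw [if_pos hgt]
        specialize ih (i + 1) (i - cl) (cl + 1) (i - cl) (cl + 1) hxs' (by omega) le_rfl
          (by omega) (fun _ => by omega) hallnew
        rw [hT1] at ih
        rw [ih]
        have hble := runLen_le_best (lst.drop (i - cl))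
        have hbl : bl < (best (lst.drop (i - cl))).length := by omega
        rw [if_pos hbl]
        by_cases h2 : cl + 1 < (best (lst.drop (i - cl))).length
        · rw [if_pos h2]
        · rw [if_neg h2]
          have heq : runLen (lst.drop (i - cl)) = cl + 1 := by omega
          rw [best_eq_take_of_le _ (by omega), heq]
      · rw [if_neg hgt]
        specialize ih (i + 1) bs bl (i - cl) (cl + 1) hxs' (by omega) (by omega)
          (by omega) (fun _ => by omega) hallnew
        rw [hT1] at ih
        rw [ih]
    · rw [if_neg hv]
      specialize ih (i + 1) bs bl cs 0 hxs' (by omega) (by omega) (by omega)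
        (fun h => absurd h (lt_irrefl 0)) (by simp)
      simp only [Nat.sub_zero] at ih
      rw [← hxs'] at ih
      rw [ih]
      have hxf : has_only_prime_digits x = false := by
        simpa using hv
      have hbb : best (lst.drop (i - cl)) = if (best xs').length ≤ cl then u else best xs' := by
        rw [huT, best_run_break u x xs' hua hxf, hul]
      rw [hbb]
      by_cases hc : (best xs').length ≤ cl
      · rw [if_pos hc, if_neg (by omega : ¬ bl < (best xs').length)]
        rw [if_neg (by rw [hul]; omega : ¬ bl < u.length)]
      · rw [if_neg hc]

lemma B_eq_best (lst : List Int) : get_longest_prime_digits_alt lst = best lst := by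
  simp only [get_longest_prime_digits_alt]
  rw [PySem.List.slice_natCast_add]
  have h := finishB_spec lst lst 0 0 0 0 0 (List.drop_zero (l := lst)).symm (by omega) le_rfl le_rfl
    (by omega) (by simp)
  simp only [Nat.sub_zero, List.drop_zero, List.take_zero] at h
  rw [h]
  split_ifs with hb
  · rfl
  · exact (List.eq_nil_of_length_eq_zero (by omega)).symm

-- ===== VERDICT (by name: the statement is the Claim_ definition above) =====
theorem get_longest_prime_digits_spec : Claim_equal_get_longest_prime_digits := by
  intro lst _
  unfold Spec_get_longest_prime_digits
  rw [A_eq_best, B_eq_best]
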